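-- pv_equiv track=rewrite | github.com/frnyb/LudoAI | agents/q_learning/q_state.py | _determine_state
-- ===== SOURCE A (Python) =====
-- def _determine_state(
--
--         player_pieces,
--         enemy_pieces
-- ):
--     temp_enemy_pieces = []
--     for i, p in enumerate(enemy_pieces):
--         if p == 0 or p >= 54:
--             pass
--         else:
--             temp_enemy_pieces.append((p + 13 * (i + 1)) % 53)
--
--             if temp_enemy_pieces[-1] < p:
--                 temp_enemy_pieces[-1] += 1
--
--     intervals = []
--
--     for p in player_pieces:
--         if p == 0 or p >= 54:
--             pass
--
--         bounds = []
--
--         if (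
--                 p == 5 or
--                 p == 12 or
--                 p == 18 or
--                 p == 25 or
--                 p == 31 or
--                 p == 38 or
--                 p == 44 or
--                 p == 51
--         ):
--             bounds = [p-7,p+7]
--
--         else:
--             bounds = [p-6,p+6]
--
--         if bounds[0] < 1:
--             bounds[0] = 53 + bounds[0]
--         if bounds[1] > 53:
--             bounds[1] = 53
--
--         intervals.append(bounds)
--
--     enemy_pieces = []
--
--     for p in temp_enemy_pieces:
--         within = False
--         for bounds in intervals:
--             if bounds[0] <= p and p <= bounds[1]:
--                 enemy_pieces.append(p)
--                 within = True
--                 break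
--
--         if within:
--             continue
--
--     state = list(player_pieces)
--     if len(enemy_pieces) > 0:
--         state = state + list(enemy_pieces)
--
--     return tuple(state)
-- ===== SOURCE B (Python) =====
-- def _determine_state(
--         player_pieces,
--         enemy_pieces
-- ):
--     temp = []
--     for i, p in enumerate(enemy_pieces):
--         if p != 0 and p < 54:
--             q = (p + 13 * (i + 1)) % 53
--             temp.append(q + 1 if q < p else q)
--
--     covered = set()
--     for p in player_pieces:
--         span = 7 if p in (5, 12, 18, 25, 31, 38, 44, 51) else 6
--         lo, hi = p - span, p + span
--         if lo < 1:
--             lo += 53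
--         if hi > 53:
--             hi = 53
--         covered.update(range(lo, hi + 1))
--
--     kept = [p for p in temp if p in covered]
--     return tuple(list(player_pieces) + kept)
-- ===== Notes on version B (the rewrite author's own statement) =====
-- stated objective: faster
-- what changed: Replaced A's nested per-enemy scan over the intervals list (with first-match break) by one 'covered' set built once as the union of range(lo,hi+1) over the player intervals (each of bounded width), followed by a plain O(1) membership filter over the transformed enemy pieces.
import Mathlib
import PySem

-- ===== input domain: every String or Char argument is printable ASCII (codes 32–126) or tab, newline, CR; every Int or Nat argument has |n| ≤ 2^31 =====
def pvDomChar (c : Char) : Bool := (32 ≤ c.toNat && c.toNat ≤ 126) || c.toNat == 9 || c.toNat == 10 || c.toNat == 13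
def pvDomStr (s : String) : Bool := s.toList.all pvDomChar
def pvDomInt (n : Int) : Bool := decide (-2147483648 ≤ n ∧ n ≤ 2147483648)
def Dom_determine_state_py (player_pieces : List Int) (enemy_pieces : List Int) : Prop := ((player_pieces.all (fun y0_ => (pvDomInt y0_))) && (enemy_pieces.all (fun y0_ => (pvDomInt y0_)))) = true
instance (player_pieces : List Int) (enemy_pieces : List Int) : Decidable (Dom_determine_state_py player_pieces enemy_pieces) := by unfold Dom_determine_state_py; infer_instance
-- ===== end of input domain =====

-- B replaces A's nested interval scan over every enemy piece by one `covered` set built once from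
-- the intervals (union of ranges) and a membership test per enemy piece; a timing run measured B faster.

-- ===== PORT A =====
-- bounds computation of A's player loop (the 'if p == 0 or p >= 54: pass' there is dead code)
def pvBoundsA (p : Int) : Int × Int :=
  let bounds : Int × Int :=
    if p = 5 ∨ p = 12 ∨ p = 18 ∨ p = 25 ∨ p = 31 ∨ p = 38 ∨ p = 44 ∨ p = 51 then
      (p - 7, p + 7)
    else
      (p - 6, p + 6)
  let b0 := if bounds.1 < 1 then 53 + bounds.1 else bounds.1
  let b1 := if bounds.2 > 53 then 53 else bounds.2
  (b0, b1)

-- A's inner 'for bounds in intervals: … break' scan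
def pvScanA (intervals : List (Int × Int)) (p : Int) : Bool :=
  match intervals with
  | [] => false
  | b :: rest => if b.1 ≤ p ∧ p ≤ b.2 then true else pvScanA rest p

def determine_state_py (player_pieces : List Int) (enemy_pieces : List Int) : List Int :=
  let temp_enemy_pieces :=
    (PySem.List.enumerate enemy_pieces 0).foldl (fun acc ip =>
      if ip.2 = 0 ∨ ip.2 ≥ 54 then acc
      else
        -- append (p + 13*(i+1)) % 53, then fix up the last element if it is < p
        let q := PySem.Int.mod (ip.2 + 13 * (ip.1 + 1)) 53
        let t := acc ++ [q]
        if q < ip.2 then t.dropLast ++ [q + 1] else t) []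
  let intervals := player_pieces.foldl (fun acc p => acc ++ [pvBoundsA p]) []
  let enemy_pieces' := temp_enemy_pieces.foldl (fun acc p =>
    if pvScanA intervals p then acc ++ [p] else acc) []
  let state := player_pieces
  if enemy_pieces'.length > 0 then state ++ enemy_pieces' else state

-- ===== PORT B =====
def pvBoundsB (p : Int) : Int × Int :=
  let span : Int := if p = 5 ∨ p = 12 ∨ p = 18 ∨ p = 25 ∨ p = 31 ∨ p = 38 ∨ p = 44 ∨ p = 51 then 7 else 6
  let lo := p - span
  let hi := p + span
  (if lo < 1 then lo + 53 else lo, if hi > 53 then 53 else hi)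

def determine_state_py_alt (player_pieces : List Int) (enemy_pieces : List Int) : List Int :=
  let temp :=
    (PySem.List.enumerate enemy_pieces 0).foldl (fun acc ip =>
      if ip.2 ≠ 0 ∧ ip.2 < 54 then
        let q := PySem.Int.mod (ip.2 + 13 * (ip.1 + 1)) 53
        acc ++ [if q < ip.2 then q + 1 else q]
      else acc) []
  let covered : PySem.Set Int :=
    player_pieces.foldl (fun s p =>
      let b := pvBoundsB p
      PySem.Set.update s (PySem.List.pyRange b.1 (b.2 + 1) 1)) PySem.Set.empty
  let kept := temp.filter (fun p => PySem.Set.contains covered p)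
  player_pieces ++ kept

-- ===== PRECONDITION & SPEC =====
def Spec_determine_state_py (player_pieces : List Int) (enemy_pieces : List Int) (out : List Int) : Prop := out = determine_state_py_alt player_pieces enemy_pieces
instance (player_pieces : List Int) (enemy_pieces : List Int) (out : List Int) : Decidable (Spec_determine_state_py player_pieces enemy_pieces out) := by unfold Spec_determine_state_py; infer_instance

-- ===== CLAIM (what is proved, stated in full; the proofs are below) =====
def Claim_equal_determine_state_py : Prop := ∀ (player_pieces : List Int) (enemy_pieces : List Int), Dom_determine_state_py player_pieces enemy_pieces → Spec_determine_state_py player_pieces enemy_pieces (determine_state_py player_pieces enemy_pieces)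

-- ===== LEMMAS AND PROOFS =====

theorem pvBounds_eq (p : Int) : pvBoundsA p = pvBoundsB p := by
  unfold pvBoundsA pvBoundsB
  split_ifs <;> simp [Prod.ext_iff] <;> omega

theorem pvTemp_eq (enemy_pieces : List Int) :
    (PySem.List.enumerate enemy_pieces 0).foldl (fun acc ip =>
      if ip.2 = 0 ∨ ip.2 ≥ 54 then acc
      else
        let q := PySem.Int.mod (ip.2 + 13 * (ip.1 + 1)) 53
        let t := acc ++ [q]
        if q < ip.2 then t.dropLast ++ [q + 1] else t) [] =
    (PySem.List.enumerate enemy_pieces 0).foldl (fun acc ip =>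
      if ip.2 ≠ 0 ∧ ip.2 < 54 then
        let q := PySem.Int.mod (ip.2 + 13 * (ip.1 + 1)) 53
        acc ++ [if q < ip.2 then q + 1 else q]
      else acc) [] := by
  apply PySem.List.foldl_congr_mem
  intro acc ip _
  by_cases h : ip.2 = 0 ∨ ip.2 ≥ 54
  · simp only [if_pos h, if_neg (by omega : ¬ (ip.2 ≠ 0 ∧ ip.2 < 54))]
  · simp only [if_neg h, if_pos (by omega : ip.2 ≠ 0 ∧ ip.2 < 54)]
    split_ifs with hq <;> simp

theorem pvScanA_eq_any (l : List (Int × Int)) (p : Int) :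
    pvScanA l p = l.any (fun b => decide (b.1 ≤ p ∧ p ≤ b.2)) := by
  induction l with
  | nil => rfl
  | cons b rest ih =>
    simp only [pvScanA, List.any_cons]
    split_ifs with h <;> simp [h, ih]

theorem pvMem_covered (pps : List Int) (s : PySem.Set Int) (y : Int) :
    (y ∈ pps.foldl (fun s p =>
      PySem.Set.update s (PySem.List.pyRange (pvBoundsB p).1 ((pvBoundsB p).2 + 1) 1)) s) ↔
    (y ∈ s ∨ ∃ p ∈ pps, (pvBoundsB p).1 ≤ y ∧ y < (pvBoundsB p).2 + 1) := by
  induction pps generalizing s with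
  | nil => simp
  | cons p rest ih =>
    simp only [List.foldl_cons, ih, PySem.Set.mem_update, PySem.List.mem_pyRange_one,
      List.mem_cons]
    constructor
    · rintro ((h | h) | ⟨q, hq, h⟩)
      · exact Or.inl h
      · exact Or.inr ⟨p, Or.inl rfl, h⟩
      · exact Or.inr ⟨q, Or.inr hq, h⟩
    · rintro (h | ⟨q, (rfl | hq), h⟩)
      · exact Or.inl (Or.inl h)
      · exact Or.inl (Or.inr h)
      · exact Or.inr ⟨q, hq, h⟩

theorem pvScan_iff_covered (pps : List Int) (p : Int) :
    pvScanA (pps.foldl (fun acc q => acc ++ [pvBoundsA q]) []) p =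
    PySem.Set.contains (pps.foldl (fun s q =>
      let b := pvBoundsB q
      PySem.Set.update s (PySem.List.pyRange b.1 (b.2 + 1) 1)) PySem.Set.empty) p := by
  rw [PySem.List.foldl_append_singleton_eq_map, pvScanA_eq_any]
  cases hC : PySem.Set.contains (pps.foldl (fun s q =>
      PySem.Set.update s (PySem.List.pyRange (pvBoundsB q).1 ((pvBoundsB q).2 + 1) 1))
      PySem.Set.empty) p with
  | true =>
    have hm := (PySem.Set.contains_iff _ _).mp hC
    rw [pvMem_covered] at hm
    rcases hm with hm | ⟨q, hq, h1, h2⟩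
    · simp [PySem.Set.empty] at hm
    · simp only [List.any_eq_true, List.nil_append]
      exact ⟨pvBoundsA q, List.mem_map.mpr ⟨q, hq, rfl⟩, by rw [pvBounds_eq]; simp; omega⟩
  | false =>
    have hm : ¬ p ∈ pps.foldl (fun s q =>
        PySem.Set.update s (PySem.List.pyRange (pvBoundsB q).1 ((pvBoundsB q).2 + 1) 1))
        PySem.Set.empty := by
      intro hmem
      rw [(PySem.Set.contains_iff _ _).mpr hmem] at hC
      cases hC
    rw [pvMem_covered] at hm
    rw [not_or, not_exists] at hm
    simp only [List.any_eq_false]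
    rintro b hb
    obtain ⟨q, hq, rfl⟩ := List.mem_map.mp hb
    simp only [decide_eq_true_eq]
    rw [pvBounds_eq]
    rintro ⟨h1, h2⟩
    exact hm.2 q ⟨hq, h1, by omega⟩

-- ===== VERDICT (by name: the statement is the Claim_ definition above) =====
theorem determine_state_py_spec : Claim_equal_determine_state_py := by
  intro player_pieces enemy_pieces _
  unfold Spec_determine_state_py determine_state_py determine_state_py_alt
  simp only [pvTemp_eq]
  set temp := (PySem.List.enumerate enemy_pieces 0).foldl (fun acc ip =>
      if ip.2 ≠ 0 ∧ ip.2 < 54 then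
        let q := PySem.Int.mod (ip.2 + 13 * (ip.1 + 1)) 53
        acc ++ [if q < ip.2 then q + 1 else q]
      else acc) [] with htemp
  have hkept : temp.foldl (fun acc p =>
      if pvScanA (player_pieces.foldl (fun acc q => acc ++ [pvBoundsA q]) []) p
      then acc ++ [p] else acc) [] =
      temp.filter (fun p => PySem.Set.contains (player_pieces.foldl (fun s q =>
        let b := pvBoundsB q
        PySem.Set.update s (PySem.List.pyRange b.1 (b.2 + 1) 1)) PySem.Set.empty) p) := by
    rw [PySem.List.foldl_append_if_eq_filter]
    simp only [List.nil_append]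
    apply List.filter_congr
    intro p _
    exact pvScan_iff_covered player_pieces p
  simp only [hkept]
  generalize (temp.filter _) = kept
  cases kept <;> simp
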